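-- pv_equiv track=rewrite | github.com/onurcangnc/ai-text-humanizer | ml.py | _reconstruct_text
-- ===== SOURCE A (Python) =====
-- from typing import List, Dict, Any, Tuple, Set
--
-- def _reconstruct_text(original: str, orig_tokens: List[str], new_tokens: List[str]) -> str:
--     """Reconstruct text by replacing tokens in the original string, preserving whitespace."""
--     result = original
--     # Walk through tokens and replace changed ones in-order
--     offset = 0
--     for orig_tok, new_tok in zip(orig_tokens, new_tokens):
--         if orig_tok == new_tok:
--             # Find and skip past this token
--             idx = result.find(orig_tok, offset)
--             if idx >= 0:
--                 offset = idx + len(orig_tok)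
--             continue
--         # Find the original token and replace it
--         idx = result.find(orig_tok, offset)
--         if idx >= 0:
--             result = result[:idx] + new_tok + result[idx + len(orig_tok):]
--             offset = idx + len(new_tok)
--     return result
-- ===== SOURCE B (Python) =====
-- from typing import List
--
-- def _reconstruct_text(original: str, orig_tokens: List[str], new_tokens: List[str]) -> str:
--     """Reconstruct text by replacing tokens in the original string, preserving whitespace.
--
--     Single pass over the untouched original: collect segments (kept prefix, new token)
--     and the final suffix, then join once instead of re-slicing the result per replacement.
--     """
--     parts = []
--     cut = 0   # start of the original suffix not yet copied to parts
--     pos = 0   # search start within original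
--     for orig_tok, new_tok in zip(orig_tokens, new_tokens):
--         idx = original.find(orig_tok, pos)
--         if idx < 0:
--             continue
--         if orig_tok == new_tok:
--             pos = idx + len(orig_tok)
--         else:
--             parts.append(original[cut:idx])
--             parts.append(new_tok)
--             cut = pos = idx + len(orig_tok)
--     parts.append(original[cut:])
--     return "".join(parts)
-- ===== Notes on version B (the rewrite author's own statement) =====
-- stated objective: alternative
-- what changed: Instead of re-slicing and rebuilding the whole result string for every changed token, B walks the untouched original once with a cut/search pointer, collects the kept segments and the new tokens in a list, and joins once at the end; it removes A's O(len) copy per replacement, but both remain dominated by the str.find scans, so measured cost is the same.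
import Mathlib
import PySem

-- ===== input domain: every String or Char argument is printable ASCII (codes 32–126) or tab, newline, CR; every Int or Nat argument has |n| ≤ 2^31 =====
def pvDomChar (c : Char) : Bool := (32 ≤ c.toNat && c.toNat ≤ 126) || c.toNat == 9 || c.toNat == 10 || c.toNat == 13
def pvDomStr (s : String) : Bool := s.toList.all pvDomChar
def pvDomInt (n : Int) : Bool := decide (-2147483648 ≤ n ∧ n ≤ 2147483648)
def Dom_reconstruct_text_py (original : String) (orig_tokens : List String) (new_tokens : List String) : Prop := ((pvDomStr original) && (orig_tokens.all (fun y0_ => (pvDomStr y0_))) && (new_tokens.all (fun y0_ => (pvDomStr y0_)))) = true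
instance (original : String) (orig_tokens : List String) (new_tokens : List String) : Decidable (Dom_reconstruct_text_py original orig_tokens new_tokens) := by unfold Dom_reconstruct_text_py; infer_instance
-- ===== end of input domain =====

-- B replaces A's repeated re-slicing of the whole result by a single pass over the untouched
-- original that collects kept segments plus the new tokens and joins once (objective: alternative).

-- ===== PORT A =====
-- A's loop over the zipped token pairs; `result`/`offset` exactly as in the Python
-- (strings handled as their code-point lists).
def pvAloop : List (List Char × List Char) → List Char → Int → List Char
  | [], result, _ => result
  | (o, n) :: rest, result, offset =>
    if o == n then
      -- find and skip past this token
      let idx := PySem.Chars.findFrom result o offset none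
      if 0 ≤ idx then pvAloop rest result (idx + PySem.Chars.len o)
      else pvAloop rest result offset
    else
      -- find the original token and replace it
      let idx := PySem.Chars.findFrom result o offset none
      if 0 ≤ idx then
        pvAloop rest
          (PySem.Chars.slice result none (some idx) ++ n ++
            PySem.Chars.slice result (some (idx + PySem.Chars.len o)) none)
          (idx + PySem.Chars.len n)
      else pvAloop rest result offset

def reconstruct_text_py (original : String) (orig_tokens : List String) (new_tokens : List String) : String :=
  String.ofList (pvAloop (List.zip (orig_tokens.map String.toList) (new_tokens.map String.toList)) original.toList 0)

-- ===== PORT B =====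
-- B's loop: `parts`/`cut`/`pos` exactly as in Source B; the original is never modified.
def pvBloop : List (List Char × List Char) → List Char → List (List Char) → Int → Int → List Char
  | [], original, parts, cut, _ =>
    PySem.Chars.join [] (parts ++ [PySem.Chars.slice original (some cut) none])
  | (o, n) :: rest, original, parts, cut, pos =>
    let idx := PySem.Chars.findFrom original o pos none
    if idx < 0 then pvBloop rest original parts cut pos
    else if o == n then pvBloop rest original parts cut (idx + PySem.Chars.len o)
    else
      pvBloop rest original
        (parts ++ [PySem.Chars.slice original (some cut) (some idx), n])
        (idx + PySem.Chars.len o) (idx + PySem.Chars.len o)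

def reconstruct_text_py_alt (original : String) (orig_tokens : List String) (new_tokens : List String) : String :=
  String.ofList (pvBloop (List.zip (orig_tokens.map String.toList) (new_tokens.map String.toList)) original.toList [] 0 0)

-- ===== PRECONDITION & SPEC =====
def Spec_reconstruct_text_py (original : String) (orig_tokens : List String) (new_tokens : List String) (out : String) : Prop := out = reconstruct_text_py_alt original orig_tokens new_tokens
instance (original : String) (orig_tokens : List String) (new_tokens : List String) (out : String) : Decidable (Spec_reconstruct_text_py original orig_tokens new_tokens out) := by unfold Spec_reconstruct_text_py; infer_instance

-- ===== CLAIM (what is proved, stated in full; the proofs are below) =====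
def Claim_equal_reconstruct_text_py : Prop := ∀ (original : String) (orig_tokens : List String) (new_tokens : List String), Dom_reconstruct_text_py original orig_tokens new_tokens → Spec_reconstruct_text_py original orig_tokens new_tokens (reconstruct_text_py original orig_tokens new_tokens)

-- ===== LEMMAS AND PROOFS =====

-- "".join on code-point lists is flatten
lemma pv_join_empty (ps : List (List Char)) : PySem.Chars.join [] ps = ps.flatten := by
  induction ps with
  | nil => simp [PySem.Chars.join_nil]
  | cons a t ih =>
    cases t with
    | nil => simp [PySem.Chars.join_singleton]
    | cons b u => simp [PySem.Chars.join_cons_cons] at ih ⊢; simp [ih]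

-- the parts accumulator of B's loop factors out in front
lemma pvBloop_parts (pairs : List (List Char × List Char)) (orig : List Char)
    (parts : List (List Char)) (cut pos : Int) :
    pvBloop pairs orig parts cut pos = parts.flatten ++ pvBloop pairs orig [] cut pos := by
  induction pairs generalizing parts cut pos with
  | nil => simp [pvBloop, pv_join_empty]
  | cons p rest ih =>
    obtain ⟨o, n⟩ := p
    simp only [pvBloop]
    split_ifs with h1 h2
    · exact ih parts cut pos
    · exact ih parts cut _
    · rw [ih (parts ++ _), ih ([] ++ _)]
      simp

-- main invariant: A's result is acc ++ orig.drop cut with offset = |acc| + (pos - cut)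
lemma pv_main (pairs : List (List Char × List Char)) (orig : List Char) (acc : List Char)
    (cut pos : Nat) (hcp : cut ≤ pos) (hpl : pos ≤ orig.length) :
    pvAloop pairs (acc ++ orig.drop cut) (((acc.length + (pos - cut) : Nat) : Int))
      = acc ++ pvBloop pairs orig [] (cut : Int) (pos : Int) := by
  induction pairs generalizing acc cut pos with
  | nil =>
    simp [pvAloop, pvBloop, PySem.List.slice_from_natCast]
  | cons p rest ih =>
    obtain ⟨o, n⟩ := p
    have hk : acc.length + (pos - cut) ≤ (acc ++ orig.drop cut).length := by
      simp; omega
    have hdrop : (acc ++ orig.drop cut).drop (acc.length + (pos - cut)) = orig.drop pos := by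
      rw [List.drop_length_add_append, List.drop_drop]
      congr 1
      omega
    have hfindA := PySem.Chars.findFrom_natCast (acc ++ orig.drop cut) o (acc.length + (pos - cut)) hk
    have hfindB := PySem.Chars.findFrom_natCast orig o pos hpl
    rw [hdrop] at hfindA
    simp only [pvAloop, pvBloop, hfindA, hfindB]
    by_cases hf : PySem.Chars.find (orig.drop pos) o = -1
    · -- not found: both loops keep their state
      simp only [hf]
      split_ifs with h1 h2 <;> first
        | omega
        | exact ih acc cut pos hcp hpl
    · -- found
      have hf0 : 0 ≤ PySem.Chars.find (orig.drop pos) o := by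
        have := PySem.Chars.neg_one_le_find (orig.drop pos) o
        omega
      set f := PySem.Chars.find (orig.drop pos) o with hfdef
      simp only [if_neg hf]
      have hfeq : f = (f.toNat : Int) := (Int.toNat_of_nonneg hf0).symm
      set fn := f.toNat with hfndef
      have hpre : o <+: (orig.drop pos).drop fn := (PySem.Chars.find_spec hf0).1
      rw [List.drop_drop] at hpre
      have hfl2 : fn + pos ≤ orig.length := by
        have hflen := PySem.Chars.find_le_length (orig.drop pos) o
        simp only [List.length_drop] at hflen
        omega
      have holen : o.length + (fn + pos) ≤ orig.length := by
        have h1 : o.length ≤ orig.length - (pos + fn) := by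
          simpa using hpre.length_le
        omega
      have hlenO := PySem.Chars.len_eq o
      have hcondA : (0:Int) ≤ ((acc.length + (pos - cut) : Nat) : Int) + f := by omega
      have hcondB : ¬ (((pos : Nat) : Int) + f < 0) := by omega
      by_cases heq : o = n
      · -- equal tokens: both just advance past the occurrence
        subst heq
        rw [if_pos (by simp : (o == o) = true), if_neg hcondB,
          if_pos (by simp : (o == o) = true), if_pos hcondA]
        have hargA : ((acc.length + (pos - cut) : Nat) : Int) + f + PySem.Chars.len o
            = ((acc.length + (pos + fn + o.length - cut) : Nat) : Int) := by
          rw [hlenO]; omega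
        have hargB : ((pos : Nat) : Int) + f + PySem.Chars.len o
            = (((pos + fn + o.length : Nat) : Int)) := by
          rw [hlenO]; omega
        rw [hargA, hargB]
        exact ih acc cut (pos + fn + o.length) (by omega) (by omega)
      · -- changed token: A splices the result; B records a segment and the new token
        rw [if_neg (by simp [heq] : ¬ (o == n) = true), if_neg hcondB,
          if_neg (by simp [heq] : ¬ (o == n) = true), if_pos hcondA]
        have hlenN := PySem.Chars.len_eq n
        have hsliceL : PySem.Chars.slice (acc ++ orig.drop cut) none
              (some (((acc.length + (pos - cut) : Nat) : Int) + f))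
            = acc ++ (orig.drop cut).take (pos - cut + fn) := by
          rw [PySem.Chars.slice_eq_listSlice, PySem.List.slice_to _ (by omega)]
          have ht : (((acc.length + (pos - cut) : Nat) : Int) + f).toNat
              = acc.length + (pos - cut + fn) := by omega
          rw [ht, List.take_length_add_append]
        have hsliceR : PySem.Chars.slice (acc ++ orig.drop cut)
              (some (((acc.length + (pos - cut) : Nat) : Int) + f + PySem.Chars.len o)) none
            = orig.drop (pos + fn + o.length) := by
          rw [PySem.Chars.slice_eq_listSlice, PySem.List.slice_from _ (by rw [hlenO]; omega)]
          have ht : (((acc.length + (pos - cut) : Nat) : Int) + f + PySem.Chars.len o).toNat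
              = acc.length + (pos - cut + fn + o.length) := by rw [hlenO]; omega
          rw [ht, List.drop_length_add_append, List.drop_drop]
          congr 1
          omega
        have hsliceB : PySem.Chars.slice orig (some ((cut : Nat) : Int))
              (some (((pos : Nat) : Int) + f))
            = (orig.drop cut).take (pos - cut + fn) := by
          rw [PySem.Chars.slice_eq_listSlice, PySem.List.slice_toNat _ (by omega) (by omega)]
          have h1 : ((cut : Nat) : Int).toNat = cut := Int.toNat_natCast cut
          have h2 : ((((pos : Nat) : Int) + f)).toNat - ((cut : Nat) : Int).toNat
              = pos - cut + fn := by omega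
          rw [h2, h1]
        have hlenacc : (acc ++ (orig.drop cut).take (pos - cut + fn) ++ n).length
            = acc.length + (pos - cut + fn) + n.length := by
          simp only [List.length_append, List.length_take, List.length_drop]
          omega
        have hoffA : ((acc.length + (pos - cut) : Nat) : Int) + f + PySem.Chars.len n
            = (((acc ++ (orig.drop cut).take (pos - cut + fn) ++ n).length
                + ((pos + fn + o.length) - (pos + fn + o.length)) : Nat) : Int) := by
          rw [hlenN, hlenacc]; omega
        have hargB : ((pos : Nat) : Int) + f + PySem.Chars.len o
            = (((pos + fn + o.length : Nat) : Int)) := by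
          rw [hlenO]; omega
        rw [hsliceL, hsliceR, hsliceB, hoffA, hargB,
          ih (acc ++ (orig.drop cut).take (pos - cut + fn) ++ n)
            (pos + fn + o.length) (pos + fn + o.length) (le_refl _) (by omega),
          pvBloop_parts rest orig ([] ++ [(orig.drop cut).take (pos - cut + fn), n])]
        simp

-- ===== VERDICT (by name: the statement is the Claim_ definition above) =====
theorem reconstruct_text_py_spec : Claim_equal_reconstruct_text_py := by
  intro original orig_tokens new_tokens _
  unfold Spec_reconstruct_text_py reconstruct_text_py reconstruct_text_py_alt
  have := pv_main (List.zip (orig_tokens.map String.toList) (new_tokens.map String.toList))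
    original.toList [] 0 0 (le_refl 0) (Nat.zero_le _)
  simpa using congrArg String.ofList this
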